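-- pv_equiv track=rewrite | github.com/sebschu/entity-tracking-lms | src/dataset_generation/generate_boxes_data.py | non_unique_object_types
-- ===== SOURCE A (Python) =====
-- from collections import Counter
--
-- def non_unique_object_types(modified_objects):
--     """Returns a set of object types that are not
--        unique in modified_objects.
--
--     Args:
--         modified_objects (set): A set of strings with modified object names.
--
--     Returns:
--         set: A set of object types that appear more than once.
--     """
--     types = [o.split(" ")[-1] for o in modified_objects]
--     counts = Counter(types)
--     non_uniques = []
--     for k, c in counts.items():
--         if c > 1:
--             non_uniques.append(k)
--     return set(non_uniques)
-- ===== SOURCE B (Python) =====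
-- def non_unique_object_types(modified_objects):
--     """Set of object types (last space-separated word) occurring more than once.
--
--     Sort-then-scan: after sorting, equal types are adjacent, so a type is
--     non-unique iff it appears in some adjacent equal pair of the sorted list.
--     """
--     types = [o.split(" ")[-1] for o in modified_objects]
--     ts = sorted(types)
--     dups = {a for a, b in zip(ts, ts[1:]) if a == b}
--     return {t for t in types if t in dups}
-- ===== Notes on version B (the rewrite author's own statement) =====
-- stated objective: alternative
-- what changed: Replaced the Counter build plus the separate c>1 filtering loop by a sort-then-scan: sort the type list, collect types occurring in an adjacent equal pair of the sorted list, then select those types in original order; no counts are ever maintained.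
import Mathlib
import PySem

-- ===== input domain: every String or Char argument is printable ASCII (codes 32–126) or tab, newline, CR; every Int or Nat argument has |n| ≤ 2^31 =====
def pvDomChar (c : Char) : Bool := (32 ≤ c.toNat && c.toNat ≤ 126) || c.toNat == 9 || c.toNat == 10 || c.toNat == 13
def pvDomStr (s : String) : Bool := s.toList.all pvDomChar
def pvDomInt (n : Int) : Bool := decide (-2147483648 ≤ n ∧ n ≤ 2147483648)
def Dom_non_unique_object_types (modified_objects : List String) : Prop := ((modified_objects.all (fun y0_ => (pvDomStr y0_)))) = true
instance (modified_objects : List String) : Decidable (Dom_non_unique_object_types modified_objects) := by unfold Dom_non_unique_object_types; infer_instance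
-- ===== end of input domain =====

-- B replaces A's Counter build plus the separate c>1 loop over counts by a sort-then-scan:
-- sort the types, take types in adjacent equal pairs, select them in original order (alternative; not claimed faster).


-- ===== PORT A =====
-- o.split(" ")[-1]: split with a separator never returns an empty list, so the [-1]
-- index never raises; the .getD "" default is unreachable.
def objType (o : String) : String :=
  (PySem.List.pyGet? ((PySem.Str.split? o " ").getD []) (-1)).getD ""

def non_unique_object_types (modified_objects : List String) : List String :=
  let types := modified_objects.map (fun o => objType o)
  let counts := PySem.Dict.counter types
  let non_uniques := counts.items.foldl (fun acc kc => if kc.2 > 1 then acc ++ [kc.1] else acc) ([] : List String)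
  PySem.Set.ofList non_uniques

-- ===== PORT B =====
def non_unique_object_types_alt (modified_objects : List String) : List String :=
  let types := modified_objects.map (fun o => objType o)
  let ts := PySem.List.sorted types (fun x => x) false
  let dups := PySem.Set.ofList
    (((ts.zip (PySem.List.slice ts (some 1) none)).filter (fun p => p.1 == p.2)).map (fun p => p.1))
  PySem.Set.ofList (types.filter (fun t => PySem.Set.contains dups t))

-- ===== PRECONDITION & SPEC =====
def Spec_non_unique_object_types (modified_objects : List String) (out : List String) : Prop := out = non_unique_object_types_alt modified_objects
instance (modified_objects : List String) (out : List String) : Decidable (Spec_non_unique_object_types modified_objects out) := by unfold Spec_non_unique_object_types; infer_instance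

-- ===== CLAIM (what is proved, stated in full; the proofs are below) =====
def Claim_equal_non_unique_object_types : Prop := ∀ (modified_objects : List String), Dom_non_unique_object_types modified_objects → Spec_non_unique_object_types modified_objects (non_unique_object_types modified_objects)

-- ===== LEMMAS AND PROOFS =====

-- Set.ofList of a list of fresh, pairwise-distinct elements appends them all.
theorem foldl_add_of_nodup {α : Type} [BEq α] [LawfulBEq α] (l : List α) :
    ∀ (acc : List α), l.Nodup → (∀ x ∈ l, x ∉ acc) →
      l.foldl PySem.Set.add acc = acc ++ l := by
  induction l with
  | nil => intro acc _ _; simp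
  | cons x t ih =>
      intro acc hnd hfresh
      have hx : x ∉ acc := hfresh x (by simp)
      have hadd : PySem.Set.add acc x = acc ++ [x] := by
        simp [PySem.Set.add, hx]
      simp only [List.foldl_cons, hadd]
      rw [ih (acc ++ [x]) hnd.of_cons]
      · simp
      · intro y hy
        simp only [List.mem_append, List.mem_singleton]
        rintro (h | rfl)
        · exact hfresh y (by simp [hy]) h
        · exact (List.nodup_cons.mp hnd).1 hy

theorem ofList_eq_self_of_nodup {α : Type} [BEq α] [LawfulBEq α] (l : List α)
    (h : l.Nodup) : PySem.Set.ofList l = l := by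
  have := foldl_add_of_nodup l [] h (by simp)
  simpa [PySem.Set.ofList, PySem.Set.empty] using this

-- Set.ofList commutes with filtering by a predicate on the element.
theorem foldl_add_filter {α : Type} [BEq α] [LawfulBEq α] (q : α → Bool) (l : List α) :
    ∀ (acc : List α),
      (l.filter q).foldl PySem.Set.add (acc.filter q) = (l.foldl PySem.Set.add acc).filter q := by
  induction l with
  | nil => intro acc; simp
  | cons x t ih =>
      intro acc
      by_cases hq : q x = true
      · by_cases hmem : x ∈ acc
        · have h1 : PySem.Set.add acc x = acc := by
            simp [PySem.Set.add, hmem]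
          have h2 : PySem.Set.add (acc.filter q) x = acc.filter q := by
            simp [PySem.Set.add, List.mem_filter, hmem, hq]
          simp only [List.filter_cons, hq, if_true, List.foldl_cons, h1, h2]
          exact ih acc
        · have h1 : PySem.Set.add acc x = acc ++ [x] := by
            simp [PySem.Set.add, hmem]
          have h2 : PySem.Set.add (acc.filter q) x = (acc ++ [x]).filter q := by
            simp [PySem.Set.add, List.mem_filter, hmem, hq, List.filter_append]
          simp only [List.filter_cons, hq, if_true, List.foldl_cons, h1, h2]
          exact ih (acc ++ [x])
      · have hq' : q x = false := by simp [hq]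
        have h2 : (PySem.Set.add acc x).filter q = acc.filter q := by
          by_cases hmem : x ∈ acc
          · simp [PySem.Set.add, hmem]
          · simp [PySem.Set.add, hmem, List.filter_append, hq']
        simp only [List.filter_cons, hq', Bool.false_eq_true, if_false, List.foldl_cons]
        rw [← ih (PySem.Set.add acc x), h2]

theorem ofList_filter {α : Type} [BEq α] [LawfulBEq α] (q : α → Bool) (l : List α) :
    PySem.Set.ofList (l.filter q) = (PySem.Set.ofList l).filter q := by
  have := foldl_add_filter q l []
  simpa [PySem.Set.ofList, PySem.Set.empty] using this

-- the common normal form both ports reduce to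
def dupPred (l : List String) (t : String) : Bool := decide (1 < l.count t)

theorem a_side (l : List String) :
    (PySem.Dict.counter l).items.foldl
        (fun acc kc => if kc.2 > 1 then acc ++ [kc.1] else acc) ([] : List String)
      = (PySem.Set.ofList l).filter (dupPred l) := by
  have h := PySem.List.foldl_append_if (fun kc : String × Int => decide (kc.2 > 1))
    (fun kc => kc.1) (PySem.Dict.counter l).items ([] : List String)
  simp only [decide_eq_true_eq] at h
  rw [h, PySem.Dict.items_counter, List.filter_map, List.nil_append, List.map_map]
  rw [List.filter_congr (q := fun k => dupPred l k) ?_]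
  · simp [Function.comp_def]
  intro x _
  simp only [Function.comp, dupPred]
  rw [Bool.eq_iff_iff]
  simp only [decide_eq_true_eq]
  constructor <;> intro hlt <;> [exact_mod_cast hlt; exact_mod_cast hlt]

-- in a ≤-sorted list, a value occurs more than once iff it occurs as an adjacent equal pair
theorem adj_iff (t : String) : ∀ (ts : List String), ts.Pairwise (· ≤ ·) →
    ((t, t) ∈ ts.zip ts.tail ↔ 1 < ts.count t) := by
  intro ts
  induction ts with
  | nil => simp
  | cons a l ih =>
      intro hp
      cases l with
      | nil =>
          simp only [List.tail_cons, List.zip_nil_right, List.not_mem_nil, false_iff, not_lt,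
            List.count_cons, List.count_nil]
          split_ifs <;> omega
      | cons b l' =>
          have hab : a ≤ b := (List.pairwise_cons.mp hp).1 b (by simp)
          have hpl : (b :: l').Pairwise (· ≤ ·) := (List.pairwise_cons.mp hp).2
          have ihb := ih hpl
          simp only [List.tail_cons, List.zip_cons_cons, List.mem_cons, Prod.mk.injEq] at ihb ⊢
          by_cases hta : t = a
          · subst hta
            by_cases htb : t = b
            · subst htb
              constructor
              · intro _
                simp
              · intro _
                exact Or.inl ⟨rfl, rfl⟩
            · have hnotin : t ∉ b :: l' := by
                intro hmem
                rcases List.mem_cons.mp hmem with h | h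
                · exact htb h
                · have hbt : b ≤ t := (List.pairwise_cons.mp hpl).1 t h
                  exact htb (le_antisymm hab hbt)
              have hc0 : (b :: l').count t = 0 := List.count_eq_zero.mpr hnotin
              have hc1 : (t :: b :: l').count t = 1 := by
                simp [hc0]
              constructor
              · rintro (⟨_, hb⟩ | hz)
                · exact absurd hb htb
                · have := ihb.mp hz
                  omega
              · intro h
                rw [hc1] at h
                omega
          · have hcnt : (a :: b :: l').count t = (b :: l').count t := by
              have hne : ¬ a = t := fun h => hta h.symm
              simp [List.count_cons, hne]
            rw [hcnt]
            constructor
            · rintro (⟨ha, _⟩ | hz)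
              · exact absurd ha hta
              · exact ihb.mp hz
            · intro h
              exact Or.inr (ihb.mpr h)

theorem b_side (l : List String) :
    l.filter (fun t => PySem.Set.contains
        (PySem.Set.ofList
          ((((PySem.List.sorted l (fun x => x) false).zip
              (PySem.List.slice (PySem.List.sorted l (fun x => x) false) (some 1) none)).filter
                (fun p => p.1 == p.2)).map (fun p => p.1))) t)
      = l.filter (dupPred l) := by
  refine List.filter_congr ?_
  intro t _
  set ts := PySem.List.sorted l (fun x => x) false with hts
  have hperm : ts.Perm l := PySem.List.sorted_perm l (fun x => x) false
  have hpw : ts.Pairwise (· ≤ ·) := by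
    simpa using PySem.List.sorted_pairwise l (fun x => x)
  have hdrop : PySem.List.slice ts (some 1) none = ts.drop 1 := by
    have := PySem.List.slice_from_natCast (xs := ts) (a := 1)
    simpa using this
  have hmem : t ∈ ((ts.zip (PySem.List.slice ts (some 1) none)).filter
      (fun p => p.1 == p.2)).map (fun p => p.1) ↔ (t, t) ∈ ts.zip ts.tail := by
    rw [hdrop, ← List.drop_one]
    simp only [List.mem_map, List.mem_filter, beq_iff_eq]
    constructor
    · rintro ⟨⟨x, y⟩, ⟨hz, hxy⟩, hx⟩
      simp only at hxy hx
      subst hx; subst hxy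
      exact hz
    · intro hz
      exact ⟨(t, t), ⟨hz, rfl⟩, rfl⟩
  have hiff : (t, t) ∈ ts.zip ts.tail ↔ 1 < l.count t := by
    rw [adj_iff t ts hpw, hperm.count_eq]
  rw [Bool.eq_iff_iff]
  constructor
  · intro hc
    have h1 : t ∈ PySem.Set.ofList ((((ts.zip (PySem.List.slice ts (some 1) none)).filter
        (fun p => p.1 == p.2)).map (fun p => p.1))) := by
      simpa [PySem.Set.contains, List.contains_iff_mem] using hc
    have h2 : t ∈ ((ts.zip (PySem.List.slice ts (some 1) none)).filter
        (fun p => p.1 == p.2)).map (fun p => p.1) := by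
      simpa [PySem.Set.mem_ofList] using h1
    simpa [dupPred] using hiff.mp (hmem.mp h2)
  · intro hd
    have hcl : 1 < l.count t := by simpa [dupPred] using hd
    have h2 : t ∈ PySem.Set.ofList ((((ts.zip (PySem.List.slice ts (some 1) none)).filter
        (fun p => p.1 == p.2)).map (fun p => p.1))) :=
      (PySem.Set.mem_ofList _ _).mpr (hmem.mpr (hiff.mpr hcl))
    simpa [PySem.Set.contains, List.contains_iff_mem] using h2

-- ===== VERDICT (by name: the statement is the Claim_ definition above) =====
theorem non_unique_object_types_spec : Claim_equal_non_unique_object_types := by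
  intro mo _
  unfold Spec_non_unique_object_types non_unique_object_types non_unique_object_types_alt
  dsimp only
  rw [a_side, b_side,
    ofList_eq_self_of_nodup _ (List.Nodup.filter _ (PySem.Set.nodup_ofList _)),
    ofList_filter]
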